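-- pv_equiv track=rewrite | github.com/Gustavopimenta/trapped_mouse | mazeLogic.py | findMoveOrder
-- ===== SOURCE A (Python) =====
-- def findMoveOrder(maze,row,col,prow, pcol,trow, tcol):
--     moveOrder = []
--     if prow < trow:
--         moveOrder.append('d')
--     else:
--         moveOrder.append('u')
--     if pcol <tcol:
--         moveOrder.append('r')
--     else:
--         moveOrder.append('l')
--
--     while(len(moveOrder)<4):
--         if not 'r' in moveOrder:
--             moveOrder.append('r')
--         if not 'd' in moveOrder:
--             moveOrder.append('d')
--         if not 'l' in moveOrder:
--             moveOrder.append('l')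
--         if not 'u' in moveOrder:
--             moveOrder.append('u')
--     return moveOrder
-- ===== SOURCE B (Python) =====
-- _ORDER_TABLE = {
--     (True, True): ('d', 'r', 'l', 'u'),
--     (True, False): ('d', 'l', 'r', 'u'),
--     (False, True): ('u', 'r', 'd', 'l'),
--     (False, False): ('u', 'l', 'r', 'd'),
-- }
--
-- def findMoveOrder(maze, row, col, prow, pcol, trow, tcol):
--     return list(_ORDER_TABLE[(prow < trow, pcol < tcol)])
-- ===== Notes on version B (the rewrite author's own statement) =====
-- stated objective: simpler
-- what changed: Replaced the append-then-while-fill construction with a direct lookup of the two comparison booleans in a precomputed 4-entry table of move orders.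
import Mathlib
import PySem

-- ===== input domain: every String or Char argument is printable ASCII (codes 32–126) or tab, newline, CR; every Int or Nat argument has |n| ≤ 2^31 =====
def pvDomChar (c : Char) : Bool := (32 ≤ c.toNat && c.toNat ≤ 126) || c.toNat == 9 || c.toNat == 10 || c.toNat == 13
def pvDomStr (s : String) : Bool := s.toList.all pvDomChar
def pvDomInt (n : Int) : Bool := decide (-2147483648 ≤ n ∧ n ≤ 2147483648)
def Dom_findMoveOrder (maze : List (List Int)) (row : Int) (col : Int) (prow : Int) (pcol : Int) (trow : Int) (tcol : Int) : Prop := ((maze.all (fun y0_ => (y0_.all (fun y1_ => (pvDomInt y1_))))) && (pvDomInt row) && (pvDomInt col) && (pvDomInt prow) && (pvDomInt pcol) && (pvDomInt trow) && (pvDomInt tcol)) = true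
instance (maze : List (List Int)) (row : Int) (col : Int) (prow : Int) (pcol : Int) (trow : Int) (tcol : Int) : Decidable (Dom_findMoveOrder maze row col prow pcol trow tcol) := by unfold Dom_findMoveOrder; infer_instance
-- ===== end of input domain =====

-- B replaces A's append-then-while-fill construction with a 4-entry table lookup on the two comparisons (simpler).


-- ===== PORT A =====
-- one body of A's while loop: the four membership-guarded appends, in order
def pvFillPass (mo : List String) : List String :=
  let mo := if mo.contains "r" then mo else mo ++ ["r"]
  let mo := if mo.contains "d" then mo else mo ++ ["d"]
  let mo := if mo.contains "l" then mo else mo ++ ["l"]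
  if mo.contains "u" then mo else mo ++ ["u"]

-- A's while loop, with fuel only to make it total (one pass always completes the list)
def pvWhileFill : Nat → List String → List String
  | 0, mo => mo
  | n + 1, mo => if mo.length < 4 then pvWhileFill n (pvFillPass mo) else mo

def findMoveOrder (maze : List (List Int)) (row : Int) (col : Int) (prow : Int) (pcol : Int) (trow : Int) (tcol : Int) : List String :=
  pvWhileFill 4 ((if prow < trow then ["d"] else ["u"]) ++ (if pcol < tcol then ["r"] else ["l"]))

-- ===== PORT B =====
def pvOrderTable : PySem.Dict (Bool × Bool) (List String) :=
  PySem.Dict.ofList [((true, true), ["d", "r", "l", "u"]),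
   ((true, false), ["d", "l", "r", "u"]),
   ((false, true), ["u", "r", "d", "l"]),
   ((false, false), ["u", "l", "r", "d"])]

def findMoveOrder_alt (maze : List (List Int)) (row : Int) (col : Int) (prow : Int) (pcol : Int) (trow : Int) (tcol : Int) : List String :=
  (pvOrderTable.get? (decide (prow < trow), decide (pcol < tcol))).getD []

-- ===== PRECONDITION & SPEC =====
def Spec_findMoveOrder (maze : List (List Int)) (row : Int) (col : Int) (prow : Int) (pcol : Int) (trow : Int) (tcol : Int) (out : List String) : Prop := out = findMoveOrder_alt maze row col prow pcol trow tcol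
instance (maze : List (List Int)) (row : Int) (col : Int) (prow : Int) (pcol : Int) (trow : Int) (tcol : Int) (out : List String) : Decidable (Spec_findMoveOrder maze row col prow pcol trow tcol out) := by unfold Spec_findMoveOrder; infer_instance

-- ===== CLAIM (what is proved, stated in full; the proofs are below) =====
def Claim_equal_findMoveOrder : Prop := ∀ (maze : List (List Int)) (row : Int) (col : Int) (prow : Int) (pcol : Int) (trow : Int) (tcol : Int), Dom_findMoveOrder maze row col prow pcol trow tcol → Spec_findMoveOrder maze row col prow pcol trow tcol (findMoveOrder maze row col prow pcol trow tcol)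

-- ===== LEMMAS AND PROOFS =====

-- ===== VERDICT (by name: the statement is the Claim_ definition above) =====
theorem findMoveOrder_spec : Claim_equal_findMoveOrder := by
  intro maze row col prow pcol trow tcol _
  unfold Spec_findMoveOrder findMoveOrder findMoveOrder_alt
  by_cases h1 : prow < trow <;> by_cases h2 : pcol < tcol <;>
    simp only [h1, h2, if_true, if_false, decide_true, decide_false] <;> decide
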